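-- pv_equiv track=rewrite | github.com/harelcohavi/PinkFloyd | data.py | slyr
-- ===== SOURCE A (Python) =====
-- def slyr(dict_of_album, song_name):
--     """
--     this function find the song lyrics
--     :param dict_of_album: dict with all the album
--     :type dict_of_album: dict
--     :param song_name: the song name
--     :type song_name: str
--     :return: the song lytics
--     :rtype: str
--     """
--     song = ""
--     for i in list(dict_of_album.values()):
--         for j in i:
--             for k in j:
--                 if song_name == j['name']:
--                     song = j['the_song']
--     return song
-- ===== SOURCE B (Python) =====
-- def slyr(dict_of_album, song_name):
--     index = {}
--     for songs in dict_of_album.values():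
--         for s in songs:
--             if s:
--                 index[s['name']] = s
--     if song_name in index:
--         return index[song_name]['the_song']
--     return ""
-- ===== Notes on version B (the rewrite author's own statement) =====
-- stated objective: simpler
-- what changed: Replaces the triple-nested scan (which re-tests each song once per key of its dict) with a single pass building a name->song index dict (later entries overwrite, preserving last-match-wins) followed by one lookup.
import Mathlib
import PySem

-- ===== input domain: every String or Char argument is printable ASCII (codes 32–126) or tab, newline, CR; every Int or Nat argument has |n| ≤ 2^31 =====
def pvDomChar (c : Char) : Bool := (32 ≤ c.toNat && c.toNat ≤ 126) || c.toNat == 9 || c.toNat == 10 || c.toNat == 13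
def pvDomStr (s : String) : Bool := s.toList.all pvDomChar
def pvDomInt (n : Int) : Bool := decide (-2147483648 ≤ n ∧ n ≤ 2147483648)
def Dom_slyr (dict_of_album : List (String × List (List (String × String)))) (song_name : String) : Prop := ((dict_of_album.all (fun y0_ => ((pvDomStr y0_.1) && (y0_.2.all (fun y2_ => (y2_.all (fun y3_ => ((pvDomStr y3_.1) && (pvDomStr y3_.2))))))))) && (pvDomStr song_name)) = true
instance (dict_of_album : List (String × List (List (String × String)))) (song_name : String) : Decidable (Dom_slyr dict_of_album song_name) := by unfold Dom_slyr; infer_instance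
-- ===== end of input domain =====

-- B replaces the triple-nested scan by a one-pass name→song index dict plus a single lookup (simpler).

-- ===== PORT A =====
-- the triple-nested loop of A: for i in values, for j in i, for k in j, if name == j['name']: song = j['the_song']
def slyr (dict_of_album : List (String × List (List (String × String)))) (song_name : String) : String :=
  (dict_of_album.map Prod.snd).foldl (fun song i =>
    i.foldl (fun song j =>
      j.foldl (fun song _k =>
        if song_name == (PySem.Dict.mk j).getD "name" "" then (PySem.Dict.mk j).getD "the_song" "" else song)
        song)
      song)
    ""

-- ===== PORT B =====
-- one pass building index : name → song dict (insert overwrites, last wins), then a single lookup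
def slyr_alt (dict_of_album : List (String × List (List (String × String)))) (song_name : String) : String :=
  let index : PySem.Dict String (List (String × String)) :=
    dict_of_album.foldl (fun idx p =>
      p.2.foldl (fun idx s =>
        if s ≠ [] then idx.insert ((PySem.Dict.mk s).getD "name" "") s else idx)
        idx)
      PySem.Dict.empty
  match index.get? song_name with
  | some s => (PySem.Dict.mk s).getD "the_song" ""
  | none => ""

-- ===== PRECONDITION & SPEC =====
-- Pre_ excludes (a) association lists with duplicate album keys or duplicate keys inside a song
-- dict, where the assoc-list representation of a Python dict is ambiguous, and (b) inputs where A
-- raises KeyError: a non-empty song dict without key "name", or a matching one without "the_song".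
def Pre_slyr (dict_of_album : List (String × List (List (String × String)))) (song_name : String) : Prop :=
  (dict_of_album.map Prod.fst).Nodup ∧
  ∀ p ∈ dict_of_album, ∀ j ∈ p.2,
    (j.map Prod.fst).Nodup ∧
    (j ≠ [] → (((PySem.Dict.mk j).get? "name").isSome = true ∧
      (song_name = (PySem.Dict.mk j).getD "name" "" → ((PySem.Dict.mk j).get? "the_song").isSome = true)))
instance (dict_of_album : List (String × List (List (String × String)))) (song_name : String) : Decidable (Pre_slyr dict_of_album song_name) := by unfold Pre_slyr; infer_instance

def pvWitness_slyr : (List (String × List (List (String × String)))) × String :=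
  ([("album", [[("name", "Money"), ("the_song", "lyrics")], []])], "Money")

def Spec_slyr (dict_of_album : List (String × List (List (String × String)))) (song_name : String) (out : String) : Prop := out = slyr_alt dict_of_album song_name
instance (dict_of_album : List (String × List (List (String × String)))) (song_name : String) (out : String) : Decidable (Spec_slyr dict_of_album song_name out) := by unfold Spec_slyr; infer_instance

-- ===== CLAIM (what is proved, stated in full; the proofs are below) =====
def Claim_equal_slyr : Prop := ∀ (dict_of_album : List (String × List (List (String × String)))) (song_name : String), Dom_slyr dict_of_album song_name → Pre_slyr dict_of_album song_name → Spec_slyr dict_of_album song_name (slyr dict_of_album song_name)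

-- ===== LEMMAS AND PROOFS =====

-- the common per-song step function both algorithms reduce to
def pvStep (song_name song : String) (j : List (String × String)) : String :=
  if j ≠ [] ∧ song_name == (PySem.Dict.mk j).getD "name" "" then (PySem.Dict.mk j).getD "the_song" "" else song

-- A's innermost loop over the keys of j keeps overwriting with the same value
theorem pv_fold_const {α : Type} (c : Prop) [Decidable c] (v w : String) (t : List α) :
    t.foldl (fun s (_ : α) => if c then v else s) (if c then v else w) = if c then v else w := by
  induction t with
  | nil => rfl
  | cons a t ih =>
      simp only [List.foldl_cons]
      by_cases h : c <;> simp [h] at ih ⊢ <;> simpa [h] using ih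

theorem pv_inner_eq (song_name song : String) (j : List (String × String)) :
    j.foldl (fun s (_ : String × String) =>
        if song_name == (PySem.Dict.mk j).getD "name" "" then (PySem.Dict.mk j).getD "the_song" "" else s)
      song = pvStep song_name song j := by
  cases j with
  | nil => simp [pvStep]
  | cons a t =>
      simp only [List.foldl_cons, pvStep]
      have h := pv_fold_const (α := String × String)
        (song_name == (PySem.Dict.mk (a :: t)).getD "name" "")
        ((PySem.Dict.mk (a :: t)).getD "the_song" "") song t
      cases hc : (song_name == (PySem.Dict.mk (a :: t)).getD "name" "") <;>
        simp [hc] at h ⊢ <;> exact h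

-- B's insert step
def pvIns (idx : PySem.Dict String (List (String × String))) (s : List (String × String)) :
    PySem.Dict String (List (String × String)) :=
  if s ≠ [] then idx.insert ((PySem.Dict.mk s).getD "name" "") s else idx

-- the lookup at the end of B
def pvOut (song_name : String) (idx : PySem.Dict String (List (String × String))) : String :=
  match idx.get? song_name with
  | some s => (PySem.Dict.mk s).getD "the_song" ""
  | none => ""

theorem pv_out_ins (song_name : String) (idx : PySem.Dict String (List (String × String)))
    (j : List (String × String)) :
    pvOut song_name (pvIns idx j) = pvStep song_name (pvOut song_name idx) j := by
  unfold pvIns pvStep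
  by_cases hj : j = []
  · simp [hj]
  · simp only [hj, ne_eq, not_false_eq_true, if_pos]
    by_cases hn : song_name = (PySem.Dict.mk j).getD "name" ""
    · simp [pvOut, hn]
    · have : (song_name == (PySem.Dict.mk j).getD "name" "") = false := by
        simp [hn]
      simp [pvOut, PySem.Dict.get?_insert, hn, this]

theorem pv_main (song_name : String) (songs : List (List (String × String)))
    (idx : PySem.Dict String (List (String × String))) :
    pvOut song_name (songs.foldl pvIns idx) = songs.foldl (pvStep song_name) (pvOut song_name idx) := by
  induction songs generalizing idx with
  | nil => rfl
  | cons j t ih =>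
      simp only [List.foldl_cons, ih, pv_out_ins]

-- fold over albums flattened
theorem pv_albums (song_name : String) (albums : List (List (List (String × String)))) (acc : String) :
    albums.foldl (fun song i => i.foldl (pvStep song_name) song) acc
      = (albums.flatMap id).foldl (pvStep song_name) acc := by
  induction albums generalizing acc with
  | nil => rfl
  | cons i t ih => simp [List.foldl_append, ih]

theorem pv_albums_ins (albums : List (List (List (String × String))))
    (idx : PySem.Dict String (List (String × String))) :
    albums.foldl (fun idx i => i.foldl pvIns idx) idx = (albums.flatMap id).foldl pvIns idx := by
  induction albums generalizing idx with
  | nil => rfl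
  | cons i t ih => simp [List.foldl_append, ih]

-- A in terms of pvStep
theorem pv_slyr_eq (dict_of_album : List (String × List (List (String × String)))) (song_name : String) :
    slyr dict_of_album song_name
      = ((dict_of_album.map Prod.snd).flatMap id).foldl (pvStep song_name) "" := by
  unfold slyr
  rw [← pv_albums]
  congr 1
  funext song i
  congr 1
  funext s j
  exact pv_inner_eq song_name s j

theorem pv_slyr_alt_eq (dict_of_album : List (String × List (List (String × String)))) (song_name : String) :
    slyr_alt dict_of_album song_name
      = pvOut song_name (((dict_of_album.map Prod.snd).flatMap id).foldl pvIns PySem.Dict.empty) := by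
  unfold slyr_alt
  rw [← pv_albums_ins]
  simp only [List.foldl_map]
  rfl

-- ===== VERDICT (by name: the statement is the Claim_ definition above) =====
theorem slyr_spec : Claim_equal_slyr := by
  intro d name _hDom _hPre
  unfold Spec_slyr
  rw [pv_slyr_eq, pv_slyr_alt_eq, pv_main]
  rfl
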